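-- pv_equiv track=rewrite | github.com/pmarino84/strategy_tester | src/examples/multi_asset/squeeze_breakout/pipeline.py | format_gmt
-- ===== SOURCE A (Python) =====
-- def format_gmt(gmt: str):
--   gmt_pre = ""
--   gmt_post = ""
--   for i in range(len(gmt)):
--       if i < 3:
--           gmt_pre += gmt[i]
--       else:
--           gmt_post += gmt[i]
--   return f"{gmt_pre}:{gmt_post}"
-- ===== SOURCE B (Python) =====
-- def format_gmt(gmt: str):
--     return f"{gmt[:3]}:{gmt[3:]}"
-- ===== Notes on version B (the rewrite author's own statement) =====
-- stated objective: simpler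
-- what changed: Replaces the per-character index loop with its two accumulator strings by directly slicing the first three characters and the rest and joining them with a colon.
import Mathlib
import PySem

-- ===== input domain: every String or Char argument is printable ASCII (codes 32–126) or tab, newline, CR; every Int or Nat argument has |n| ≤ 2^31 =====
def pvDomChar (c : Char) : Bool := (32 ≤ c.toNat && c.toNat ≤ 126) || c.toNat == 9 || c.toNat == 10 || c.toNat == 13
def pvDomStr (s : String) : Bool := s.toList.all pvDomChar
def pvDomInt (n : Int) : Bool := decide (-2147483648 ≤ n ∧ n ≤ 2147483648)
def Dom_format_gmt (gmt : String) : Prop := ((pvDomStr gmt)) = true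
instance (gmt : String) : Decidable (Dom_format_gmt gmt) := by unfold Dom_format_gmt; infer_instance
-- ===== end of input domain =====

-- B replaces A's per-character index loop with direct slicing (simpler).

-- ===== PORT A =====
-- loop over range(len(gmt)) building gmt_pre / gmt_post character by character
def format_gmt (gmt : String) : String :=
  let cs := gmt.toList
  let st := (PySem.List.pyRange 0 (cs.length : Int) 1).foldl
    (fun (acc : List Char × List Char) i =>
      if i < 3 then (acc.1 ++ [PySem.List.pyGetD cs i ' '], acc.2)
      else (acc.1, acc.2 ++ [PySem.List.pyGetD cs i ' '])) ([], [])
  String.ofList (st.1 ++ ':' :: st.2)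

-- ===== PORT B =====
-- gmt[:3] + ":" + gmt[3:]
def format_gmt_alt (gmt : String) : String :=
  String.ofList (PySem.List.slice gmt.toList none (some 3) ++
    ':' :: PySem.List.slice gmt.toList (some 3) none)

-- ===== PRECONDITION & SPEC =====
def Spec_format_gmt (gmt : String) (out : String) : Prop := out = format_gmt_alt gmt
instance (gmt : String) (out : String) : Decidable (Spec_format_gmt gmt out) := by unfold Spec_format_gmt; infer_instance

-- ===== CLAIM (what is proved, stated in full; the proofs are below) =====
def Claim_equal_format_gmt : Prop := ∀ (gmt : String), Dom_format_gmt gmt → Spec_format_gmt gmt (format_gmt gmt)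

-- ===== LEMMAS AND PROOFS =====

-- the loop, viewed over enumerate, splits the list at position (3 - s)
theorem pv_enumfold (cs : List Char) : ∀ (s : Nat) (p q : List Char),
    (PySem.List.enumerate cs (s : Int)).foldl
      (fun (acc : List Char × List Char) x =>
        if x.1 < 3 then (acc.1 ++ [x.2], acc.2) else (acc.1, acc.2 ++ [x.2])) (p, q)
    = (p ++ cs.take ((3 - (s : Int)).toNat), q ++ cs.drop ((3 - (s : Int)).toNat)) := by
  induction cs with
  | nil => intro s p q; simp [PySem.List.enumerate_nil]
  | cons c t ih =>
    intro s p q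
    rw [PySem.List.enumerate_cons]
    by_cases hs : (s : Int) < 3
    · have h1 : ((s : Int) + 1) = ((s + 1 : Nat) : Int) := by push_cast; ring
      simp only [List.foldl_cons, if_pos hs, h1, ih (s + 1)]
      have h2 : (3 - (s : Int)).toNat = (3 - ((s + 1 : Nat) : Int)).toNat + 1 := by omega
      simp [h2]
    · have h1 : ((s : Int) + 1) = ((s + 1 : Nat) : Int) := by push_cast; ring
      simp only [List.foldl_cons, if_neg hs, h1, ih (s + 1)]
      have h2 : (3 - (s : Int)).toNat = 0 := by omega
      have h3 : (3 - ((s : Int) + 1)).toNat = 0 := by omega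
      simp [h2, h3]

-- ===== VERDICT (by name: the statement is the Claim_ definition above) =====
theorem format_gmt_spec : Claim_equal_format_gmt := by
  intro gmt _
  unfold Spec_format_gmt format_gmt format_gmt_alt
  set cs := gmt.toList with hcs
  have hrange : (PySem.List.pyRange 0 (cs.length : Int) 1).foldl
      (fun (acc : List Char × List Char) i =>
        if i < 3 then (acc.1 ++ [PySem.List.pyGetD cs i ' '], acc.2)
        else (acc.1, acc.2 ++ [PySem.List.pyGetD cs i ' '])) ([], [])
      = (PySem.List.enumerate cs ((0 : Nat) : Int)).foldl
      (fun (acc : List Char × List Char) x =>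
        if x.1 < 3 then (acc.1 ++ [x.2], acc.2) else (acc.1, acc.2 ++ [x.2])) ([], []) := by
    have e0 : ((0 : Nat) : Int) = 0 := by norm_num
    rw [e0, PySem.List.enumerate_eq_map_pyRange cs ' ', List.foldl_map]
    simp
  simp only [hrange, pv_enumfold cs 0 [] []]
  have ht := PySem.List.slice_to_natCast cs 3
  have hf := PySem.List.slice_from_natCast cs 3
  norm_num at ht hf
  rw [ht, hf]
  simp
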